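-- pv_equiv track=rewrite | github.com/patrickSupernormal/walnut | alive-mcp/src/alive_mcp/tools/search.py | _iter_matches_in_file
-- ===== SOURCE A (Python) =====
-- import unicodedata
-- from typing import Any, Dict, Iterable, List, Optional, Tuple
--
-- _CONTENT_MAX_CHARS = 200
--
-- _CONTEXT_WINDOW = 2
--
-- def _normalize_line(line: str, case_sensitive: bool) -> str:
--     """Canonicalize a scanned line the same way as the query.
--
--     Same transforms as :func:`_normalize_query` so the two strings
--     are comparable. Isolated into its own helper because the hot
--     path (one call per scanned line) can be micro-optimized later
--     without touching callers.
--     """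
--     normalized = unicodedata.normalize("NFC", line)
--     if case_sensitive:
--         return normalized
--     return normalized.casefold()
--
-- def _truncate_content(line: str) -> str:
--     """Cap ``line`` at :data:`_CONTENT_MAX_CHARS` characters.
--
--     Python string slicing is codepoint-aware -- we slice by
--     codepoints, not bytes, so a multi-byte UTF-8 character never gets
--     split. No ellipsis is appended: the protocol consumer knows the
--     cap from the tool description and can request more context via
--     reader tools if needed.
--     """
--     if len(line) <= _CONTENT_MAX_CHARS:
--         return line
--     return line[:_CONTENT_MAX_CHARS]
--
-- def _context_slice(
--     lines: List[str],
--     index: int,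
-- ) -> Tuple[List[str], List[str]]:
--     """Return ``(context_before, context_after)`` around ``lines[index]``.
--
--     Each side is at most :data:`_CONTEXT_WINDOW` entries. Near file
--     edges the arrays shrink (they are NOT padded) so the receiver can
--     distinguish "no context available" from "context was empty text".
--
--     Each context line is also capped at :data:`_CONTENT_MAX_CHARS` so
--     a single long adjacent line can't blow up the response size.
--     """
--     start = max(0, index - _CONTEXT_WINDOW)
--     end = min(len(lines), index + 1 + _CONTEXT_WINDOW)
--     before = [_truncate_content(lines[i]) for i in range(start, index)]
--     after = [_truncate_content(lines[i]) for i in range(index + 1, end)]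
--     return before, after
--
-- def _iter_matches_in_file(
--     lines: List[str],
--     normalized_query: str,
--     case_sensitive: bool,
--     start_line: int,
-- ) -> Iterable[Tuple[int, str, List[str], List[str]]]:
--     """Yield ``(line_number, content, before, after)`` for each match.
--
--     ``start_line`` is 1-based and INCLUSIVE: the first line considered
--     is ``lines[start_line - 1]``. ``line_number`` in the yielded
--     tuple is 1-based.
--
--     Matches are emitted in line-number ascending order -- scanning is
--     linear so this is automatic.
--     """
--     # Guard the start index. ``start_line`` of 0 (first call) becomes
--     # index 0; values beyond len(lines) yield nothing.
--     start_idx = max(0, start_line - 1)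
--     for i in range(start_idx, len(lines)):
--         line = lines[i]
--         haystack = _normalize_line(line, case_sensitive)
--         if normalized_query in haystack:
--             before, after = _context_slice(lines, i)
--             yield (i + 1, _truncate_content(line), before, after)
-- ===== SOURCE B (Python) =====
-- import unicodedata
-- from collections import deque
--
-- _CONTENT_MAX_CHARS = 200
--
-- _CONTEXT_WINDOW = 2
--
--
-- def _iter_matches_in_file(lines, normalized_query, case_sensitive, start_line):
--     """Forward scan keeping a running deque of the previous (already
--     truncated) lines as the 'before' context, instead of slicing
--     backward into ``lines`` at every match."""
--     start_idx = max(0, start_line - 1)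
--     before = deque(
--         (l[:_CONTENT_MAX_CHARS] for l in lines[max(0, start_idx - _CONTEXT_WINDOW):start_idx]),
--         maxlen=_CONTEXT_WINDOW,
--     )
--     tail = lines[start_idx:]
--     for k, line in enumerate(tail):
--         hay = unicodedata.normalize("NFC", line)
--         if not case_sensitive:
--             hay = hay.casefold()
--         if normalized_query in hay:
--             yield (
--                 start_idx + k + 1,
--                 line[:_CONTENT_MAX_CHARS],
--                 list(before),
--                 [l[:_CONTENT_MAX_CHARS] for l in tail[k + 1 : k + 1 + _CONTEXT_WINDOW]],
--             )
--         before.append(line[:_CONTENT_MAX_CHARS])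
-- ===== Notes on version B (the rewrite author's own statement) =====
-- stated objective: alternative
-- what changed: B scans the suffix once keeping a running deque(maxlen=2) of the previously truncated lines as the 'before' context, instead of A's backward slice into lines at every match.
import Mathlib
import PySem

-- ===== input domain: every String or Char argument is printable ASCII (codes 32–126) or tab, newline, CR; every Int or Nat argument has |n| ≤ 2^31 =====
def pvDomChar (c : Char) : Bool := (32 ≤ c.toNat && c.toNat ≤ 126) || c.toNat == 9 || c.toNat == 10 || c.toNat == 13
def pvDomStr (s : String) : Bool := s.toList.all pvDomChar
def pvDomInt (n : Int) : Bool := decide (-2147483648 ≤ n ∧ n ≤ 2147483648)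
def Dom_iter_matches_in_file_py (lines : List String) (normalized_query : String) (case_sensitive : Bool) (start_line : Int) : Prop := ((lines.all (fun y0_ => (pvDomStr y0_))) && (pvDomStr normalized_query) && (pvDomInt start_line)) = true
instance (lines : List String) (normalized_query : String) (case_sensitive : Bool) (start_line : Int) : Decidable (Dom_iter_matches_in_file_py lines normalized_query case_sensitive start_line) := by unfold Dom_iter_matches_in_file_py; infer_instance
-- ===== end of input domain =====

-- B replaces A's backward context slice at each match by a single forward scan with a
-- running 2-line window of already-truncated lines (alternative decomposition, same cost).

-- ===== PORT A =====
-- _normalize_line: unicodedata.normalize("NFC", ·) is the identity on the ASCII domain;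
-- casefold coincides with lower on ASCII, ported as PySem.Str.lower.
def normalize_line_a (line : String) (case_sensitive : Bool) : String :=
  if case_sensitive then line else PySem.Str.lower line

def truncate_content_a (line : String) : String :=
  if PySem.Str.len line ≤ 200 then line else PySem.Str.slice line none (some 200)

def context_slice_a (lines : List String) (index : Int) : List String × List String :=
  let start := max 0 (index - 2)
  let end_ := min (PySem.List.len lines) (index + 1 + 2)
  let before := (PySem.List.pyRange start index).map
    (fun i => truncate_content_a (PySem.List.pyGetD lines i ""))
  let after := (PySem.List.pyRange (index + 1) end_).map
    (fun i => truncate_content_a (PySem.List.pyGetD lines i ""))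
  (before, after)

def iter_matches_in_file_py (lines : List String) (normalized_query : String) (case_sensitive : Bool) (start_line : Int) : List (Int × String × List String × List String) :=
  let start_idx := max 0 (start_line - 1)
  (PySem.List.pyRange start_idx (PySem.List.len lines)).foldl
    (fun out i =>
      let line := PySem.List.pyGetD lines i ""
      let haystack := normalize_line_a line case_sensitive
      if PySem.Str.isIn normalized_query haystack then
        let c := context_slice_a lines i
        out ++ [(i + 1, truncate_content_a line, c.1, c.2)]
      else out)
    []

-- ===== PORT B =====
def trunc_b (line : String) : String := PySem.Str.slice line none (some 200)   -- line[:200]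

-- deque(maxlen=2).append
def push_win_b (win : List String) (t : String) : List String :=
  if win.length < 2 then win ++ [t] else win.tail ++ [t]

-- the for-loop over `tail` (tail[k+1:] IS `rest`, so tail[k+1:k+3] is rest.take 2)
def alt_loop (normalized_query : String) (case_sensitive : Bool) :
    Int → List String → List String → List (Int × String × List String × List String)
  | _, _, [] => []
  | i, win, line :: rest =>
    let hay := if case_sensitive then line else PySem.Str.lower line
    (if PySem.Str.isIn normalized_query hay then
      [(i + 1, trunc_b line, win, (rest.take 2).map trunc_b)]
    else []) ++ alt_loop normalized_query case_sensitive (i + 1) (push_win_b win (trunc_b line)) rest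

def iter_matches_in_file_py_alt (lines : List String) (normalized_query : String) (case_sensitive : Bool) (start_line : Int) : List (Int × String × List String × List String) :=
  let start_idx := max 0 (start_line - 1)
  let before := (PySem.List.slice lines (some (max 0 (start_idx - 2))) (some start_idx)).map trunc_b
  alt_loop normalized_query case_sensitive start_idx before
    (PySem.List.slice lines (some start_idx) none)

-- ===== PRECONDITION & SPEC =====
def Spec_iter_matches_in_file_py (lines : List String) (normalized_query : String) (case_sensitive : Bool) (start_line : Int) (out : List (Int × String × List String × List String)) : Prop := out = iter_matches_in_file_py_alt lines normalized_query case_sensitive start_line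
instance (lines : List String) (normalized_query : String) (case_sensitive : Bool) (start_line : Int) (out : List (Int × String × List String × List String)) : Decidable (Spec_iter_matches_in_file_py lines normalized_query case_sensitive start_line out) := by unfold Spec_iter_matches_in_file_py; infer_instance

-- ===== CLAIM (what is proved, stated in full; the proofs are below) =====
def Claim_equal_iter_matches_in_file_py : Prop := ∀ (lines : List String) (normalized_query : String) (case_sensitive : Bool) (start_line : Int), Dom_iter_matches_in_file_py lines normalized_query case_sensitive start_line → Spec_iter_matches_in_file_py lines normalized_query case_sensitive start_line (iter_matches_in_file_py lines normalized_query case_sensitive start_line)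

-- ===== LEMMAS AND PROOFS =====

lemma trunc_a_eq_b (l : String) : truncate_content_a l = trunc_b l := by
  unfold truncate_content_a trunc_b
  split_ifs with h
  · have hl : l.toList.length ≤ 200 := by
      have := h; rw [PySem.Str.len_eq] at this; exact_mod_cast this
    have h2 : (PySem.Str.slice l none (some 200)).toList = l.toList := by
      rw [PySem.Str.toList_slice, PySem.Chars.slice_eq_listSlice]
      rw [show (200 : Int) = ((200 : Nat) : Int) by norm_num, PySem.List.slice_to_natCast]
      exact List.take_of_length_le hl
    exact (String.toList_inj.mp h2).symm
  · rfl

lemma map_range_eq (xs : List String) (b : Nat) (hb : b ≤ xs.length) :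
    ∀ a : Nat, (PySem.List.pyRange (a : Int) (b : Int)).map
        (fun j => truncate_content_a (PySem.List.pyGetD xs j ""))
      = ((xs.drop a).take (b - a)).map trunc_b := by
  induction b with
  | zero =>
    intro a
    rw [PySem.List.pyRange_one_eq_nil (by exact_mod_cast Nat.zero_le a)]
    simp
  | succ b ih =>
    intro a
    by_cases hab : a ≤ b
    · rw [show ((b+1 : Nat) : Int) = (b : Int) + 1 by push_cast; ring,
        PySem.List.pyRange_one_succ_right (by exact_mod_cast hab), List.map_append]
      rw [ih (by omega) a]
      have hsub : b + 1 - a = (b - a) + 1 := by omega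
      rw [hsub, List.take_add_one]
      have hbl : b < xs.length := by omega
      have hget : (xs.drop a)[b - a]? = some xs[b] := by
        rw [List.getElem?_drop]
        rw [List.getElem?_eq_getElem (by omega)]
        congr 1; congr 1; omega
      rw [hget]
      have hg : PySem.List.pyGetD xs ((b:Nat):Int) "" = xs[b] :=
        PySem.List.pyGetD_eq_getElem xs "" (by positivity) (by exact_mod_cast hbl)
      simp [hg, trunc_a_eq_b]
    · rw [PySem.List.pyRange_one_eq_nil (by exact_mod_cast (by omega : b + 1 ≤ a))]
      rw [show b + 1 - a = 0 by omega]
      simp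

lemma push_win_shift (A : List String) (t : String) :
    push_win_b (A.drop (A.length - 2)) t = (A ++ [t]).drop (A.length + 1 - 2) := by
  unfold push_win_b
  by_cases h : A.length ≤ 1
  · rw [show A.length - 2 = 0 by omega, show A.length + 1 - 2 = 0 by omega]
    have : A.length < 2 := by omega
    simp [this]
  · have hlen : (A.drop (A.length - 2)).length = 2 := by simp; omega
    rw [if_neg (by rw [hlen]; omega)]
    rw [List.tail_drop, show A.length - 2 + 1 = A.length - 1 by omega]
    rw [List.drop_append_of_le_length (by omega), show A.length + 1 - 2 = A.length - 1 by omega]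

lemma before_eq (lines : List String) (m : Nat) (hm : m < lines.length) :
    (PySem.List.pyRange (max 0 ((m : Int) - 2)) (m : Int)).map
        (fun j => truncate_content_a (PySem.List.pyGetD lines j ""))
      = ((lines.take m).map trunc_b).drop (m - 2) := by
  rw [show (max 0 ((m : Int) - 2)) = ((m - 2 : Nat) : Int) by omega]
  rw [map_range_eq lines m (by omega) (m - 2)]
  rw [← List.map_drop, List.drop_take]

lemma after_eq (lines : List String) (m : Nat) (hm : m < lines.length) :
    (PySem.List.pyRange ((m : Int) + 1) (min (PySem.List.len lines) ((m : Int) + 1 + 2))).map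
        (fun j => truncate_content_a (PySem.List.pyGetD lines j ""))
      = ((lines.drop (m + 1)).take 2).map trunc_b := by
  have hlen : PySem.List.len lines = (lines.length : Int) := by simp [PySem.List.len]
  rw [hlen, show ((m : Int) + 1) = ((m + 1 : Nat) : Int) by push_cast; ring,
    show (min ((lines.length : Nat) : Int) ((((m+1) : Nat) : Int) + 2)) = ((min lines.length (m + 3) : Nat) : Int) by push_cast; omega]
  rw [map_range_eq lines (min lines.length (m+3)) (by omega) (m+1)]
  congr 1
  by_cases h : lines.length ≤ m + 3
  · rw [show min lines.length (m+3) - (m+1) = lines.length - (m+1) by omega]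
    rw [List.take_of_length_le (by simp), List.take_of_length_le (by simp; omega)]
  · rw [show min lines.length (m+3) - (m+1) = 2 by omega]

lemma loop_eq (lines : List String) (q : String) (cs : Bool) :
    ∀ (tail : List String) (m : Nat) (acc : List (Int × String × List String × List String)),
      tail = lines.drop m →
      (PySem.List.pyRange (m : Int) ((lines.length : Nat) : Int)).foldl
        (fun out i =>
          let line := PySem.List.pyGetD lines i ""
          let haystack := normalize_line_a line cs
          if PySem.Str.isIn q haystack then
            let c := context_slice_a lines i
            out ++ [(i + 1, truncate_content_a line, c.1, c.2)]
          else out) acc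
      = acc ++ alt_loop q cs (m : Int) (((lines.take m).map trunc_b).drop (m - 2)) tail := by
  intro tail
  induction tail with
  | nil =>
    intro m acc htail
    have hle : lines.length ≤ m := by
      have := congrArg List.length htail
      simp at this; omega
    rw [PySem.List.pyRange_one_eq_nil (by exact_mod_cast hle)]
    simp [alt_loop]
  | cons line rest ih =>
    intro m acc htail
    have hm : m < lines.length := by
      have := congrArg List.length htail
      simp at this; omega
    have hdec := List.drop_eq_getElem_cons (l := lines) (i := m) hm
    rw [← htail] at hdec
    have hline : line = lines[m] := by injection hdec
    have hrest : rest = lines.drop (m + 1) := by injection hdec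
    subst hline
    -- window update
    have hA : ((lines.take m).map trunc_b).length = m := by simp; omega
    have hwin : push_win_b (((lines.take m).map trunc_b).drop (m - 2)) (trunc_b lines[m])
        = ((lines.take (m+1)).map trunc_b).drop (m + 1 - 2) := by
      have h2 := push_win_shift ((lines.take m).map trunc_b) (trunc_b lines[m])
      rw [hA] at h2
      rw [h2]
      have h3 : (lines.take (m+1)).map trunc_b = (lines.take m).map trunc_b ++ [trunc_b lines[m]] := by
        rw [List.take_add_one, List.getElem?_eq_getElem hm, Option.toList_some,
          List.map_append, List.map_cons, List.map_nil]
      rw [h3]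
    -- the step
    have hget : PySem.List.pyGetD lines ((m : Nat) : Int) "" = lines[m] :=
      PySem.List.pyGetD_eq_getElem lines "" (by positivity) (by exact_mod_cast hm)
    rw [PySem.List.pyRange_one_cons (by exact_mod_cast hm), List.foldl_cons]
    rw [show ((m : Nat) : Int) + 1 = (((m+1) : Nat) : Int) by push_cast; ring]
    rw [ih (m+1) _ hrest]
    show _ ++ alt_loop q cs _ _ rest = acc ++ alt_loop q cs (m : Int) _ (lines[m] :: rest)
    rw [alt_loop]
    rw [show ((m : Nat) : Int) + 1 = (((m+1) : Nat) : Int) by push_cast; ring, hwin]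
    rw [← List.append_assoc]
    congr 1
    simp only [hget, normalize_line_a, context_slice_a]
    by_cases hhit : PySem.Str.isIn q (if cs then lines[m] else PySem.Str.lower lines[m]) = true
    · rw [if_pos hhit, if_pos hhit, trunc_a_eq_b, before_eq lines m hm,
        after_eq lines m hm, hrest]
    · rw [if_neg hhit, if_neg hhit]
      simp

-- ===== VERDICT (by name: the statement is the Claim_ definition above) =====
theorem iter_matches_in_file_py_spec : Claim_equal_iter_matches_in_file_py := by
  intro lines q cs sl _
  show iter_matches_in_file_py lines q cs sl = iter_matches_in_file_py_alt lines q cs sl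
  unfold iter_matches_in_file_py iter_matches_in_file_py_alt
  dsimp only []
  have hs : (0 : Int) ≤ max 0 (sl - 1) := le_max_left _ _
  obtain ⟨m, hm⟩ : ∃ m : Nat, max 0 (sl - 1) = (m : Int) := ⟨(max 0 (sl - 1)).toNat, (Int.toNat_of_nonneg hs).symm⟩
  have hlen : PySem.List.len lines = ((lines.length : Nat) : Int) := rfl
  rw [hm, hlen]
  rw [PySem.List.slice_from lines (by positivity : (0:Int) ≤ (m:Int)), Int.toNat_natCast]
  rw [show (max 0 ((m : Int) - 2)) = ((m - 2 : Nat) : Int) by omega]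
  rw [PySem.List.slice_natCast]
  have hseed : ((List.drop (m - 2) lines).take (m - (m - 2))).map trunc_b
      = ((lines.take m).map trunc_b).drop (m - 2) := by
    rw [← List.map_drop, List.drop_take]
  rw [hseed]
  rw [loop_eq lines q cs (lines.drop m) m [] rfl]
  simp
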